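-- pv_equiv track=rewrite | github.com/SEDarrow/AIRobotics | naoTest.py | clusterCells
-- ===== SOURCE A (Python) =====
-- def clusterCells(cellCoordinates):
--   adjacency = []
--   for cell in cellCoordinates:
--     found = False
--
--     # check surrounding coordinates to see if they
--     # are also in the list (so they are the same color)
--     for xChange in range(-1, 2):
--       if found:
--         continue
--       for yChange in range(-1, 2):
--         if found:
--           continue
--         x = cell[0] + xChange
--         y = cell[1] + yChange
--
--         for cluster in adjacency:
--           if found:
--             continue
--           for clusterCell in cluster:
--             # if a neighboring cell is already in a cluster,
--             # add the new cell to that cluster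
--             if x == clusterCell[0] and y == clusterCell[1]:
--               found = True
--               cluster.append(cell)
--               continue
--     # if a cell is not in another cluster, start it's own cluster
--     if not found:
--       adjacency.append([cell])
--   return adjacency
-- ===== SOURCE B (Python) =====
-- def clusterCells(cellCoordinates):
--   # Stage 1: label each cell with a cluster number (first labelled 8-neighbor's
--   # label in A's offset order, else a fresh label), via a coordinate->label dict.
--   labels = []
--   labelOf = {}
--   nextLabel = 0
--   for (x, y) in cellCoordinates:
--     for nb in ((x - 1, y - 1), (x - 1, y), (x - 1, y + 1),
--                (x, y - 1), (x, y), (x, y + 1),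
--                (x + 1, y - 1), (x + 1, y), (x + 1, y + 1)):
--       if nb in labelOf:
--         lab = labelOf[nb]
--         break
--     else:
--       lab = nextLabel
--       nextLabel += 1
--     labelOf[(x, y)] = lab
--     labels.append(lab)
--   # Stage 2: bucket the cells by label, in input order.
--   clusters = [[] for _ in range(nextLabel)]
--   for cell, lab in zip(cellCoordinates, labels):
--     clusters[lab].append(cell)
--   return clusters
-- ===== Notes on version B (the rewrite author's own statement) =====
-- stated objective: faster
-- what changed: B splits the work into two staged passes: a labeling pass that assigns each cell a cluster number via a coordinate-to-label dict (9 O(1) lookups per cell, no cluster lists maintained), then a bucketing pass that groups the cells by label; A grows cluster lists in one pass, rescanning every already-clustered cell for each of the 9 offsets.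
-- outside the precondition, e.g. on clusterCells([(0, 0), (0, 0)]): A does not finish within the time limit, B returns [[(0, 0), (0, 0)]]
import Mathlib
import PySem

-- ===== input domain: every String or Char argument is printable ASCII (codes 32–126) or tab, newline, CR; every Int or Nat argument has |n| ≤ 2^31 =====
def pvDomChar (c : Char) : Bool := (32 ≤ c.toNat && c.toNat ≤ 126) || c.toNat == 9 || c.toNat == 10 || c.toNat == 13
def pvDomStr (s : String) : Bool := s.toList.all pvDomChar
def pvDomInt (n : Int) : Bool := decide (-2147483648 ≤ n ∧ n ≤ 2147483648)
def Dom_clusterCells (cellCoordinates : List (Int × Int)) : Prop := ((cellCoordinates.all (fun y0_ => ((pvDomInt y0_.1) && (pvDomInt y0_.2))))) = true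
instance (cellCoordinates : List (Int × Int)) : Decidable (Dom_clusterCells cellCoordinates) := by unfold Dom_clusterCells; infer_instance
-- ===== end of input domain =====

-- B replaces A's single pass that grows cluster lists (rescanning every clustered cell
-- for each of the 9 offsets) by two staged passes: a dict-based labeling pass, then a
-- bucketing pass grouping the cells by label.

-- ===== PORT A =====
-- inner loop `for clusterCell in cluster: if x == cc[0] and y == cc[1]: found=True; cluster.append(cell)`.
-- Python iterates the LIVE list; we iterate a snapshot with the live list as accumulator — exact on every
-- input where the Python loop terminates (then no appended copy of `cell` ever equals the probed (x,y)).
def pvScanClusterA (x y : Int) (cell : Int × Int) (cluster : List (Int × Int)) :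
    List (Int × Int) × Bool :=
  cluster.foldl
    (fun st cc => if x = cc.1 ∧ y = cc.2 then (st.1 ++ [cell], true) else st)
    (cluster, false)

-- `for cluster in adjacency: if found: continue; for clusterCell in cluster: …`
def pvScanAdjA (x y : Int) (cell : Int × Int) (adj : List (List (Int × Int))) :
    List (List (Int × Int)) × Bool :=
  adj.foldl
    (fun st cluster =>
      if st.2 then (st.1 ++ [cluster], st.2)
      else
        let r := pvScanClusterA x y cell cluster
        (st.1 ++ [r.1], r.2))
    ([], false)

-- one iteration of `for cell in cellCoordinates`
def pvCellStepA (adj : List (List (Int × Int))) (cell : Int × Int) :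
    List (List (Int × Int)) :=
  let r :=
    (PySem.List.pyRange (-1) 2 1).foldl
      (fun st xChange =>
        if st.2 then st
        else
          (PySem.List.pyRange (-1) 2 1).foldl
            (fun st2 yChange =>
              if st2.2 then st2
              else pvScanAdjA (cell.1 + xChange) (cell.2 + yChange) cell st2.1)
            st)
      (adj, false)
  if r.2 then r.1 else r.1 ++ [[cell]]

def clusterCells (cellCoordinates : List (Int × Int)) : List (List (Int × Int)) :=
  cellCoordinates.foldl pvCellStepA []

-- ===== PORT B =====
-- the 9-neighbour tuple `((x-1,y-1), (x-1,y), …, (x+1,y+1))` of Source B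
def pvNbrs (x y : Int) : List (Int × Int) :=
  [(x - 1, y - 1), (x - 1, y), (x - 1, y + 1),
   (x, y - 1), (x, y), (x, y + 1),
   (x + 1, y - 1), (x + 1, y), (x + 1, y + 1)]

-- one iteration of Source B's labeling loop: state (labels, labelOf, nextLabel);
-- the `for nb … break / else` is findSome? over the neighbour list
def pvLabelStep (st : List Nat × PySem.Dict (Int × Int) Nat × Nat) (cell : Int × Int) :
    List Nat × PySem.Dict (Int × Int) Nat × Nat :=
  match (pvNbrs cell.1 cell.2).findSome? (fun p => st.2.1.get? p) with
  | some lab => (st.1 ++ [lab], st.2.1.insert cell lab, st.2.2)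
  | none => (st.1 ++ [st.2.2], st.2.1.insert cell st.2.2, st.2.2 + 1)

-- stage 2: `clusters = [[] for _ in range(nextLabel)]; for cell, lab in zip(…): clusters[lab].append(cell)`
def clusterCells_alt (cellCoordinates : List (Int × Int)) : List (List (Int × Int)) :=
  let r := cellCoordinates.foldl pvLabelStep ([], PySem.Dict.ofList [], 0)
  (cellCoordinates.zip r.1).foldl
    (fun cl p => cl.modify p.2 (fun c => c ++ [p.1]))
    (List.replicate r.2.2 [])

-- ===== PRECONDITION & SPEC =====
-- Pre_ excludes lists with duplicate coordinates: there A's append-while-iterating either loops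
-- forever (when the cell's own coordinate is already clustered and no earlier-offset neighbour
-- matches) or appends the cell once per duplicate of the matched neighbour — an accident of
-- iterating a list while appending to it.
def Pre_clusterCells (cellCoordinates : List (Int × Int)) : Prop :=
  cellCoordinates.Nodup
instance (cellCoordinates : List (Int × Int)) : Decidable (Pre_clusterCells cellCoordinates) := by
  unfold Pre_clusterCells; infer_instance

def pvWitness_clusterCells : (List (Int × Int)) := [(0, 0), (1, 1), (5, 5)]

def Spec_clusterCells (cellCoordinates : List (Int × Int)) (out : List (List (Int × Int))) : Prop := out = clusterCells_alt cellCoordinates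
instance (cellCoordinates : List (Int × Int)) (out : List (List (Int × Int))) : Decidable (Spec_clusterCells cellCoordinates out) := by unfold Spec_clusterCells; infer_instance

-- ===== CLAIM (what is proved, stated in full; the proofs are below) =====
def Claim_equal_clusterCells : Prop := ∀ (cellCoordinates : List (Int × Int)), Dom_clusterCells cellCoordinates → Pre_clusterCells cellCoordinates → Spec_clusterCells cellCoordinates (clusterCells cellCoordinates)

-- ===== LEMMAS AND PROOFS =====

-- dict w correctly indexes adjacency: w.get? p = some j  iff  p lies in cluster j
def pvInv (adj : List (List (Int × Int))) (w : PySem.Dict (Int × Int) Nat) : Prop :=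
  ∀ p j, w.get? p = some j ↔ ∃ h : j < adj.length, p ∈ adj[j]

lemma pv_mem_flatten_iff {adj : List (List (Int × Int))} {p : Int × Int} :
    p ∈ adj.flatten ↔ ∃ (j : Nat) (h : j < adj.length), p ∈ adj[j] := by
  rw [List.mem_flatten]
  constructor
  · rintro ⟨c, hc, hp⟩
    obtain ⟨j, hj, rfl⟩ := List.getElem_of_mem hc
    exact ⟨j, hj, hp⟩
  · rintro ⟨j, hj, hp⟩
    exact ⟨adj[j], List.getElem_mem _, hp⟩

-- the snapshot fold over a cluster, in closed form
lemma pvScanClusterA_closed (x y : Int) (cell : Int × Int) (cluster : List (Int × Int)) :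
    pvScanClusterA x y cell cluster =
      (cluster ++ List.replicate (cluster.count (x, y)) cell,
       cluster.contains (x, y)) := by
  suffices h : ∀ (l a : List (Int × Int)) (b : Bool),
      l.foldl (fun st cc => if x = cc.1 ∧ y = cc.2 then (st.1 ++ [cell], true) else st) (a, b)
        = (a ++ List.replicate (l.count (x, y)) cell, b || l.contains (x, y)) by
    simpa [pvScanClusterA] using h cluster cluster false
  intro l
  induction l with
  | nil => simp
  | cons cc t ih =>
      intro a b
      by_cases hc : x = cc.1 ∧ y = cc.2
      · obtain ⟨h1, h2⟩ := hc
        have hcc : cc = (x, y) := by cases cc; simp_all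
        subst hcc
        simp [List.foldl_cons, ih]
        rw [← List.replicate_succ, List.replicate_succ']
      · have hcc : cc ≠ (x, y) := by
          rintro rfl; exact hc ⟨rfl, rfl⟩
        simp only [List.foldl_cons, if_neg hc, ih]
        simp [hcc, Ne.symm hcc]

lemma pvScanClusterA_not_mem (x y : Int) (cell : Int × Int) {cluster : List (Int × Int)}
    (h : (x, y) ∉ cluster) : pvScanClusterA x y cell cluster = (cluster, false) := by
  rw [pvScanClusterA_closed]
  simp [List.count_eq_zero.2 h, h]

lemma pvScanClusterA_mem_nodup (x y : Int) (cell : Int × Int) {cluster : List (Int × Int)}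
    (hnd : cluster.Nodup) (h : (x, y) ∈ cluster) :
    pvScanClusterA x y cell cluster = (cluster ++ [cell], true) := by
  rw [pvScanClusterA_closed]
  simp [List.count_eq_one_of_mem hnd h, h]

-- the cluster fold starting from an arbitrary accumulator
lemma pvScanAdjA_go_found (x y : Int) (cell : Int × Int)
    (adj : List (List (Int × Int))) (acc : List (List (Int × Int))) :
    adj.foldl
      (fun st cluster =>
        if st.2 then (st.1 ++ [cluster], st.2)
        else
          let r := pvScanClusterA x y cell cluster
          (st.1 ++ [r.1], r.2))
      (acc, true) = (acc ++ adj, true) := by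
  induction adj generalizing acc with
  | nil => simp
  | cons c t ih => simp [List.foldl_cons, ih]

lemma pvScanAdjA_go_none (x y : Int) (cell : Int × Int)
    {adj : List (List (Int × Int))} (h : ∀ cl ∈ adj, (x, y) ∉ cl)
    (acc : List (List (Int × Int))) :
    adj.foldl
      (fun st cluster =>
        if st.2 then (st.1 ++ [cluster], st.2)
        else
          let r := pvScanClusterA x y cell cluster
          (st.1 ++ [r.1], r.2))
      (acc, false) = (acc ++ adj, false) := by
  induction adj generalizing acc with
  | nil => simp
  | cons c t ih =>
      simp only [List.foldl_cons, if_neg (by simp : ¬ (false = true))]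
      rw [pvScanClusterA_not_mem x y cell (h c (by simp))]
      have := ih (fun cl hcl => h cl (by simp [hcl])) (acc ++ [c])
      simpa using this

lemma pvScanAdjA_none (x y : Int) (cell : Int × Int)
    {adj : List (List (Int × Int))} (h : (x, y) ∉ adj.flatten) :
    pvScanAdjA x y cell adj = (adj, false) := by
  have h' : ∀ cl ∈ adj, (x, y) ∉ cl := by
    intro cl hcl hp; exact h (List.mem_flatten.2 ⟨cl, hcl, hp⟩)
  have := pvScanAdjA_go_none x y cell h' []
  simpa [pvScanAdjA] using this

lemma pvScanAdjA_found (x y : Int) (cell : Int × Int)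
    {adj : List (List (Int × Int))} (hnd : adj.flatten.Nodup)
    {j : Nat} (hj : j < adj.length) (hp : (x, y) ∈ adj[j]) :
    pvScanAdjA x y cell adj = (adj.modify j (· ++ [cell]), true) := by
  suffices h : ∀ (adj : List (List (Int × Int))), adj.flatten.Nodup →
      ∀ (j : Nat) (hj : j < adj.length), (x, y) ∈ adj[j] →
      ∀ acc : List (List (Int × Int)),
      adj.foldl
        (fun st cluster =>
          if st.2 then (st.1 ++ [cluster], st.2)
          else
            let r := pvScanClusterA x y cell cluster
            (st.1 ++ [r.1], r.2))
        (acc, false) = (acc ++ adj.modify j (· ++ [cell]), true) by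
    simpa [pvScanAdjA] using h adj hnd j hj hp []
  clear hnd hj hp
  intro adj
  induction adj with
  | nil => intro _ j hj; simp at hj
  | cons c t ih =>
      intro hnd j hj hp acc
      rw [List.flatten_cons, List.nodup_append] at hnd
      match j with
      | 0 =>
          simp only [List.getElem_cons_zero] at hp
          have hs := pvScanClusterA_mem_nodup x y cell hnd.1 hp
          simp only [List.foldl_cons, Bool.false_eq_true, if_false, hs]
          rw [pvScanAdjA_go_found]
          simp [List.modify]
      | j+1 =>
          simp only [List.getElem_cons_succ] at hp
          have hjt : j < t.length := by simpa using hj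
          have hnc : (x, y) ∉ c := by
            intro hm
            exact hnd.2.2 (x, y) hm (x, y)
              (List.mem_flatten.2 ⟨t[j], List.getElem_mem hjt, hp⟩) rfl
          simp only [List.foldl_cons, Bool.false_eq_true, if_false,
            pvScanClusterA_not_mem x y cell hnc]
          rw [ih hnd.2.1 j hjt hp (acc ++ [c])]
          simp [List.modify]

-- searching the 9 offsets, generic over the offset list
lemma pv_search_eq (cell : Int × Int) (ps : List (Int × Int))
    {adj : List (List (Int × Int))} {w : PySem.Dict (Int × Int) Nat}
    (hinv : pvInv adj w) (hnd : adj.flatten.Nodup) :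
    ps.foldl
      (fun st p => if st.2 then st else pvScanAdjA (cell.1 + p.1) (cell.2 + p.2) cell st.1)
      (adj, false)
    = match ps.findSome? (fun p => w.get? (cell.1 + p.1, cell.2 + p.2)) with
      | none => (adj, false)
      | some j => (adj.modify j (· ++ [cell]), true) := by
  induction ps with
  | nil => simp
  | cons p t ih =>
      simp only [List.foldl_cons, List.findSome?_cons]
      cases hg : w.get? (cell.1 + p.1, cell.2 + p.2) with
      | none =>
          have hnm : (cell.1 + p.1, cell.2 + p.2) ∉ adj.flatten := by
            intro hm
            obtain ⟨j, hj, hpj⟩ := pv_mem_flatten_iff.1 hm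
            have h2 := (hinv _ j).2 ⟨hj, hpj⟩
            rw [hg] at h2
            exact absurd h2 (by simp)
          rw [if_neg (by simp), pvScanAdjA_none _ _ _ hnm]
          exact ih
      | some j =>
          obtain ⟨hj, hpj⟩ := (hinv _ j).1 hg
          rw [if_neg (by simp), pvScanAdjA_found _ _ _ hnd hj hpj]
          clear ih
          induction t with
          | nil => simp
          | cons q tq ihq => simpa using ihq

-- A's nested offset loops equal the flat fold over the 9 offset pairs
lemma pvCellStepA_flat (adj : List (List (Int × Int))) (cell : Int × Int) :
    pvCellStepA adj cell =
      (let r :=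
        ((([-1, 0, 1] : List Int).flatMap
            (fun dx => ([-1, 0, 1] : List Int).map (fun dy => (dx, dy)))).foldl
          (fun st p => if st.2 then st
                       else pvScanAdjA (cell.1 + p.1) (cell.2 + p.2) cell st.1)
          (adj, false))
       if r.2 then r.1 else r.1 ++ [[cell]]) := by
  have hinner : ∀ (dx : Int) (dys : List Int) (st : List (List (Int × Int)) × Bool),
      st.2 = true →
      dys.foldl (fun st2 dy =>
        if st2.2 then st2 else pvScanAdjA (cell.1 + dx) (cell.2 + dy) cell st2.1) st = st := by
    intro dx dys
    induction dys with
    | nil => intro st _; rfl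
    | cons a tl ih =>
        intro st h
        simp only [List.foldl_cons, h, if_true]
        exact ih st h
  have houter : ∀ (dxs dys : List Int) (st : List (List (Int × Int)) × Bool),
      dxs.foldl (fun st dx =>
        if st.2 then st
        else dys.foldl (fun st2 dy =>
          if st2.2 then st2 else pvScanAdjA (cell.1 + dx) (cell.2 + dy) cell st2.1) st) st
      = dxs.foldl (fun st dx =>
          dys.foldl (fun st2 dy =>
            if st2.2 then st2 else pvScanAdjA (cell.1 + dx) (cell.2 + dy) cell st2.1) st) st := by
    intro dxs dys
    induction dxs with
    | nil => intro st; rfl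
    | cons a tl ih =>
        intro st
        simp only [List.foldl_cons]
        by_cases h : st.2 = true
        · rw [if_pos h, hinner a dys st h]
          exact ih st
        · rw [if_neg h]
          exact ih _
  unfold pvCellStepA
  rw [show PySem.List.pyRange (-1) 2 1 = [-1, 0, 1] from rfl]
  rw [List.foldl_flatMap]
  simp only [List.foldl_map]
  rw [houter]

-- B's neighbour list is the offset list mapped through (cell + ·)
lemma pvNbrs_eq (x y : Int) :
    pvNbrs x y =
      (([-1, 0, 1] : List Int).flatMap
        (fun dx => ([-1, 0, 1] : List Int).map (fun dy => (dx, dy)))).map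
        (fun p => (x + p.1, y + p.2)) := by
  simp [pvNbrs]
  omega

lemma pvFind_eq (x y : Int) (w : PySem.Dict (Int × Int) Nat) :
    (pvNbrs x y).findSome? (fun p => w.get? p) =
      (([-1, 0, 1] : List Int).flatMap
        (fun dx => ([-1, 0, 1] : List Int).map (fun dy => (dx, dy)))).findSome?
        (fun p => w.get? (x + p.1, y + p.2)) := by
  rw [pvNbrs_eq, List.findSome?_map]
  rfl

-- ghost replay of A's cluster growth, driven by the assigned labels only
def pvGhostBuild : List (List (Int × Int)) → List ((Int × Int) × Nat) → List (List (Int × Int))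
  | cl, [] => cl
  | cl, (c, j) :: t =>
      if j < cl.length then pvGhostBuild (cl.modify j (fun k => k ++ [c])) t
      else pvGhostBuild (cl ++ [[c]]) t

-- the labels are canonical: each is an existing cluster index or the next fresh one
def pvCanon : Nat → List ((Int × Int) × Nat) → Prop
  | _, [] => True
  | n, (_, j) :: t => j ≤ n ∧ pvCanon (if j < n then n else n + 1) t

-- final cluster count after consuming the labels
def pvN : Nat → List ((Int × Int) × Nat) → Nat
  | n, [] => n
  | n, (_, j) :: t => pvN (if j < n then n else n + 1) t

lemma pvN_ge (pairs : List ((Int × Int) × Nat)) : ∀ n, n ≤ pvN n pairs := by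
  induction pairs with
  | nil => intro n; simp [pvN]
  | cons p t ih =>
      intro n
      have := ih (if p.2 < n then n else n + 1)
      have h2 : n ≤ (if p.2 < n then n else n + 1) := by split <;> omega
      calc n ≤ _ := h2
        _ ≤ _ := this
        _ = pvN n (p :: t) := by cases p; simp [pvN]

lemma pv_modify_append_left {α : Type} (l l' : List α) (j : Nat) (f : α → α)
    (h : j < l.length) : (l ++ l').modify j f = l.modify j f ++ l' := by
  apply List.ext_getElem
  · simp [List.length_modify]
  · intro i h1 h2
    rw [List.getElem_modify]
    by_cases hij : j = i
    · subst hij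
      rw [List.getElem_append_left h, List.getElem_append_left (by simpa [List.length_modify] using h),
        List.getElem_modify]
    · rw [if_neg hij]
      by_cases hil : i < l.length
      · rw [List.getElem_append_left hil, List.getElem_append_left (by simpa [List.length_modify] using hil),
          List.getElem_modify, if_neg hij]
      · have hil' : ¬ i < (l.modify j f).length := by simpa [List.length_modify] using hil
        rw [List.getElem_append_right (by omega), List.getElem_append_right (by simp [List.length_modify]; omega)]
        simp [List.length_modify]

lemma pv_modify_append_mid {α : Type} (l l' : List α) (x : α) (f : α → α) :
    (l ++ x :: l').modify l.length f = l ++ f x :: l' := by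
  induction l with
  | nil => simp [List.modify]
  | cons a t ih => simpa [List.modify] using ih

-- padding lemma: the ghost build equals the bucketing fold over pre-allocated empty buckets
lemma pv_pad : ∀ (pairs : List ((Int × Int) × Nat)) (cl : List (List (Int × Int))),
    pvCanon cl.length pairs →
    pvGhostBuild cl pairs =
      pairs.foldl (fun z p => z.modify p.2 (fun k => k ++ [p.1]))
        (cl ++ List.replicate (pvN cl.length pairs - cl.length) []) := by
  intro pairs
  induction pairs with
  | nil => intro cl _; simp [pvGhostBuild, pvN]
  | cons p t ih =>
      obtain ⟨c, j⟩ := p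
      intro cl hc
      obtain ⟨hle, hct⟩ := hc
      by_cases hj : j < cl.length
      · have hn : pvN cl.length ((c, j) :: t) = pvN cl.length t := by simp [pvN, hj]
        rw [pvGhostBuild, if_pos hj, List.foldl_cons, hn]
        rw [pv_modify_append_left _ _ _ _ hj]
        have := ih (cl.modify j (fun k => k ++ [c]))
          (by simpa [List.length_modify, hj] using hct)
        rw [this]
        simp [List.length_modify]
      · have hjeq : j = cl.length := by omega
        subst hjeq
        have hn : pvN cl.length ((c, cl.length) :: t) = pvN (cl.length + 1) t := by
          simp [pvN]
        rw [pvGhostBuild, if_neg hj, List.foldl_cons, hn]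
        have hge : cl.length + 1 ≤ pvN (cl.length + 1) t := pvN_ge t _
        have hrep : List.replicate (pvN (cl.length + 1) t - cl.length) ([] : List (Int × Int))
            = [] :: List.replicate (pvN (cl.length + 1) t - (cl.length + 1)) [] := by
          rw [show pvN (cl.length + 1) t - cl.length
              = (pvN (cl.length + 1) t - (cl.length + 1)) + 1 by omega]
          rw [List.replicate_succ]
        rw [hrep, pv_modify_append_mid]
        have := ih (cl ++ [[c]]) (by simpa using hct)
        rw [this]
        simp

-- invariant update: a fresh cell starts a new cluster
lemma pv_upd_new (adj : List (List (Int × Int))) (w : PySem.Dict (Int × Int) Nat)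
    (cell : Int × Int) (hinv : pvInv adj w) (hnd : adj.flatten.Nodup)
    (hfresh : cell ∉ adj.flatten) :
    pvInv (adj ++ [[cell]]) (w.insert cell adj.length) ∧
    (adj ++ [[cell]]).flatten.Nodup ∧
    (∀ q, q ∈ (adj ++ [[cell]]).flatten ↔ q = cell ∨ q ∈ adj.flatten) := by
  refine ⟨?_, ?_, ?_⟩
  · intro p i
    rw [PySem.Dict.get?_insert]
    by_cases hp : p = cell
    · subst hp
      rw [if_pos rfl]
      constructor
      · intro h
        injection h with h
        subst h
        refine ⟨by simp, ?_⟩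
        rw [List.getElem_concat_length rfl]
        simp
      · rintro ⟨hi, hm⟩
        by_cases hil : i < adj.length
        · rw [List.getElem_append_left hil] at hm
          exact absurd (pv_mem_flatten_iff.2 ⟨i, hil, hm⟩) hfresh
        · have hieq : adj.length = i := by simp at hi; omega
          simp [hieq]
    · simp only [if_neg hp]
      constructor
      · intro h
        obtain ⟨hi, hm⟩ := (hinv p i).1 h
        exact ⟨by simp; omega, by rw [List.getElem_append_left hi]; exact hm⟩
      · rintro ⟨hi, hm⟩
        by_cases hil : i < adj.length
        · rw [List.getElem_append_left hil] at hm
          exact (hinv p i).2 ⟨hil, hm⟩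
        · have hieq : i = adj.length := by simp at hi; omega
          subst hieq
          rw [List.getElem_concat_length rfl] at hm
          simp at hm
          exact absurd hm hp
  · simp only [List.flatten_append, List.flatten_cons, List.flatten_nil, List.append_nil]
    rw [List.nodup_append]
    exact ⟨hnd, List.nodup_singleton cell, fun a ha b hb => by
      simp at hb; rintro rfl; exact hfresh (hb ▸ ha)⟩
  · intro q
    simp only [List.flatten_append]
    simp
    exact or_comm

-- invariant update: a cell joins cluster j
lemma pv_upd_found (adj : List (List (Int × Int))) (w : PySem.Dict (Int × Int) Nat)
    (cell : Int × Int) (j : Nat) (hinv : pvInv adj w) (hnd : adj.flatten.Nodup)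
    (hfresh : cell ∉ adj.flatten) (hj : j < adj.length) :
    pvInv (adj.modify j (· ++ [cell])) (w.insert cell j) ∧
    (adj.modify j (· ++ [cell])).flatten.Nodup ∧
    (∀ q, q ∈ (adj.modify j (· ++ [cell])).flatten ↔ q = cell ∨ q ∈ adj.flatten) := by
  have hdecomp : adj.modify j (· ++ [cell]) =
      adj.take j ++ (adj[j] ++ [cell]) :: adj.drop (j + 1) :=
    List.modify_eq_take_cons_drop hj
  have hadj : adj = adj.take j ++ adj[j] :: adj.drop (j + 1) := by
    conv_lhs => rw [← List.take_append_drop j adj]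
    rw [List.drop_eq_getElem_cons hj]
  have hperm : (adj.modify j (· ++ [cell])).flatten.Perm (cell :: adj.flatten) := by
    rw [hdecomp]
    conv_rhs => rw [hadj]
    rw [List.flatten_append, List.flatten_cons]
    rw [List.flatten_append, List.flatten_cons]
    have h1 : (adj.take j).flatten ++ ((adj[j] ++ [cell]) ++ (adj.drop (j + 1)).flatten)
        = ((adj.take j).flatten ++ adj[j]) ++ cell :: (adj.drop (j + 1)).flatten := by
      simp [List.append_assoc]
    have h2 : cell :: ((adj.take j).flatten ++ (adj[j] ++ (adj.drop (j + 1)).flatten))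
        = cell :: (((adj.take j).flatten ++ adj[j]) ++ (adj.drop (j + 1)).flatten) := by
      simp [List.append_assoc]
    rw [h1, h2]
    exact List.perm_middle
  refine ⟨?_, ?_, ?_⟩
  · intro p i
    rw [PySem.Dict.get?_insert]
    by_cases hp : p = cell
    · subst hp
      rw [if_pos rfl]
      constructor
      · intro h
        injection h with h
        subst h
        refine ⟨by simpa [List.length_modify] using hj, ?_⟩
        rw [List.getElem_modify]
        simp
      · rintro ⟨hi, hm⟩
        rw [List.getElem_modify] at hm
        by_cases hij : j = i
        · simp [hij]
        · rw [if_neg hij] at hm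
          have hi' : i < adj.length := by simpa [List.length_modify] using hi
          exact absurd (pv_mem_flatten_iff.2 ⟨i, hi', hm⟩) hfresh
    · simp only [if_neg hp]
      constructor
      · intro h
        obtain ⟨hi, hm⟩ := (hinv p i).1 h
        refine ⟨by simpa [List.length_modify] using hi, ?_⟩
        rw [List.getElem_modify]
        by_cases hij : j = i
        · rw [if_pos hij]
          exact List.mem_append_left _ hm
        · rw [if_neg hij]
          exact hm
      · rintro ⟨hi, hm⟩
        have hi' : i < adj.length := by simpa [List.length_modify] using hi
        rw [List.getElem_modify] at hm
        refine (hinv p i).2 ⟨hi', ?_⟩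
        by_cases hij : j = i
        · rw [if_pos hij] at hm
          rcases List.mem_append.1 hm with h | h
          · exact h
          · simp at h
            exact absurd h hp
        · rw [if_neg hij] at hm
          exact hm
  · exact hperm.nodup_iff.2 (List.nodup_cons.2 ⟨hfresh, hnd⟩)
  · intro q
    rw [hperm.mem_iff]
    simp

-- the labels component of the labeling fold only grows by appending
lemma pvLabel_append (cells : List (Int × Int)) :
    ∀ (L : List Nat) (w : PySem.Dict (Int × Int) Nat) (n : Nat),
    cells.foldl pvLabelStep (L, w, n)
      = (L ++ (cells.foldl pvLabelStep ([], w, n)).1, (cells.foldl pvLabelStep ([], w, n)).2) := by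
  induction cells with
  | nil => intro L w n; simp
  | cons c t ih =>
      intro L w n
      simp only [List.foldl_cons]
      cases hf : (pvNbrs c.1 c.2).findSome? (fun p => w.get? p) with
      | some j =>
          rw [show pvLabelStep (L, w, n) c = (L ++ [j], w.insert c j, n) by
                simp [pvLabelStep, hf],
              show pvLabelStep ([], w, n) c = ([j], w.insert c j, n) by
                simp [pvLabelStep, hf]]
          rw [ih (L ++ [j]), ih [j]]
          simp
      | none =>
          rw [show pvLabelStep (L, w, n) c = (L ++ [n], w.insert c n, n + 1) by
                simp [pvLabelStep, hf],
              show pvLabelStep ([], w, n) c = ([n], w.insert c n, n + 1) by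
                simp [pvLabelStep, hf]]
          rw [ih (L ++ [n]), ih [n]]
          simp

-- A's one-cell step in terms of the neighbour search
lemma pvCellStepA_search (adj : List (List (Int × Int))) (w : PySem.Dict (Int × Int) Nat)
    (cell : Int × Int) (hinv : pvInv adj w) (hnd : adj.flatten.Nodup) :
    pvCellStepA adj cell =
      match (pvNbrs cell.1 cell.2).findSome? (fun p => w.get? p) with
      | none => adj ++ [[cell]]
      | some j => adj.modify j (· ++ [cell]) := by
  rw [pvCellStepA_flat, pvFind_eq]
  rw [pv_search_eq cell _ hinv hnd]
  cases ((([-1, 0, 1] : List Int).flatMap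
      (fun dx => ([-1, 0, 1] : List Int).map (fun dy => (dx, dy)))).findSome?
      (fun p => w.get? (cell.1 + p.1, cell.2 + p.2))) <;> simp

-- main induction: A's fold is the ghost build over B's labels, the labels are canonical,
-- and B's counter is the final cluster count
lemma pv_main : ∀ (cells : List (Int × Int)) (adj : List (List (Int × Int)))
    (w : PySem.Dict (Int × Int) Nat), pvInv adj w → adj.flatten.Nodup → cells.Nodup →
    (∀ c ∈ cells, c ∉ adj.flatten) →
    cells.foldl pvCellStepA adj
      = pvGhostBuild adj (cells.zip (cells.foldl pvLabelStep ([], w, adj.length)).1) ∧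
    pvCanon adj.length (cells.zip (cells.foldl pvLabelStep ([], w, adj.length)).1) ∧
    (cells.foldl pvLabelStep ([], w, adj.length)).2.2
      = pvN adj.length (cells.zip (cells.foldl pvLabelStep ([], w, adj.length)).1) := by
  intro cells
  induction cells with
  | nil => intro adj w _ _ _ _; exact ⟨rfl, trivial, rfl⟩
  | cons c t ih =>
      intro adj w hinv hnd hndc hdisj
      have hfresh : c ∉ adj.flatten := hdisj c (by simp)
      have hA := pvCellStepA_search adj w c hinv hnd
      cases hf : (pvNbrs c.1 c.2).findSome? (fun p => w.get? p) with
      | some j =>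
          obtain ⟨p, hpmem, hpget⟩ := List.exists_of_findSome?_eq_some hf
          obtain ⟨hj, _⟩ := (hinv p j).1 hpget
          rw [hf] at hA
          obtain ⟨hinv', hnd', hmem'⟩ := pv_upd_found adj w c j hinv hnd hfresh hj
          have hlen : (adj.modify j (· ++ [c])).length = adj.length := List.length_modify ..
          have hdisj' : ∀ q ∈ t, q ∉ (adj.modify j (· ++ [c])).flatten := by
            intro q hq hm
            rcases (hmem' q).1 hm with rfl | hm'
            · exact (List.nodup_cons.1 hndc).1 hq
            · exact hdisj q (by simp [hq]) hm'
          obtain ⟨ihA, ihC, ihN⟩ := ih (adj.modify j (· ++ [c])) (w.insert c j)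
            hinv' hnd' hndc.of_cons hdisj'
          rw [hlen] at ihA ihC ihN
          have hstep : (c :: t).foldl pvLabelStep ([], w, adj.length)
              = (j :: (t.foldl pvLabelStep ([], w.insert c j, adj.length)).1,
                 (t.foldl pvLabelStep ([], w.insert c j, adj.length)).2) := by
            simp only [List.foldl_cons]
            rw [show pvLabelStep ([], w, adj.length) c = ([j], w.insert c j, adj.length) by
                  simp [pvLabelStep, hf]]
            rw [pvLabel_append t [j]]
            simp
          rw [hstep]
          simp only [List.zip_cons_cons, List.foldl_cons]
          refine ⟨?_, ⟨Nat.le_of_lt hj, ?_⟩, ?_⟩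
          · rw [hA, pvGhostBuild, if_pos hj]
            exact ihA
          · rw [if_pos hj]; exact ihC
          · rw [show pvN adj.length ((c, j) :: t.zip (t.foldl pvLabelStep ([], w.insert c j, adj.length)).1)
                = pvN adj.length (t.zip (t.foldl pvLabelStep ([], w.insert c j, adj.length)).1) by
                  simp [pvN, hj]]
            exact ihN
      | none =>
          rw [hf] at hA
          obtain ⟨hinv', hnd', hmem'⟩ := pv_upd_new adj w c hinv hnd hfresh
          have hlen : (adj ++ [[c]]).length = adj.length + 1 := by simp
          have hdisj' : ∀ q ∈ t, q ∉ (adj ++ [[c]]).flatten := by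
            intro q hq hm
            rcases (hmem' q).1 hm with rfl | hm'
            · exact (List.nodup_cons.1 hndc).1 hq
            · exact hdisj q (by simp [hq]) hm'
          obtain ⟨ihA, ihC, ihN⟩ := ih (adj ++ [[c]]) (w.insert c adj.length)
            hinv' hnd' hndc.of_cons hdisj'
          rw [hlen] at ihA ihC ihN
          have hstep : (c :: t).foldl pvLabelStep ([], w, adj.length)
              = (adj.length :: (t.foldl pvLabelStep ([], w.insert c adj.length, adj.length + 1)).1,
                 (t.foldl pvLabelStep ([], w.insert c adj.length, adj.length + 1)).2) := by
            simp only [List.foldl_cons]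
            rw [show pvLabelStep ([], w, adj.length) c
                = ([adj.length], w.insert c adj.length, adj.length + 1) by
                  simp [pvLabelStep, hf]]
            rw [pvLabel_append t [adj.length]]
            simp
          rw [hstep]
          simp only [List.zip_cons_cons, List.foldl_cons]
          refine ⟨?_, ⟨Nat.le_refl _, ?_⟩, ?_⟩
          · rw [hA, pvGhostBuild, if_neg (by omega)]
            exact ihA
          · rw [if_neg (by omega)]; exact ihC
          · rw [show pvN adj.length
                ((c, adj.length) :: t.zip (t.foldl pvLabelStep ([], w.insert c adj.length, adj.length + 1)).1)
                = pvN (adj.length + 1)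
                    (t.zip (t.foldl pvLabelStep ([], w.insert c adj.length, adj.length + 1)).1) by
                  simp [pvN]]
            exact ihN

-- ===== VERDICT (by name: the statement is the Claim_ definition above) =====
theorem clusterCells_spec : Claim_equal_clusterCells := by
  intro l _ hpre
  unfold Spec_clusterCells clusterCells clusterCells_alt
  obtain ⟨h1, h2, h3⟩ := pv_main l [] (PySem.Dict.ofList [])
    (by
      intro p j
      simp [show (PySem.Dict.ofList ([] : List ((Int × Int) × Nat))).get? p = none from rfl])
    (by simp) hpre (by simp)
  simp only [List.length_nil] at h1 h2 h3
  rw [h1, pv_pad _ [] (by simpa using h2)]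
  simp [h3]
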